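-- pv_equiv track=rewrite | github.com/toddleb/prizym | spmedge/src/estimator/spm_estimator.py | _map_category_to_estimator
-- ===== SOURCE A (Python) =====
-- from typing import Dict, List, Tuple, Optional, Union
--
-- def _map_category_to_estimator(comm_plan_category: str) -> Optional[str]:
--     """
--     Map communication plan category to estimator category.
--
--     Args:
--         comm_plan_category: Category from communication plan
--
--     Returns:
--         Mapped estimator category or None if no match
--     """
--     category_mapping = {
--         # Configuration mappings
--         'Sales Planning': 'Configuration',
--         'Sales Hierarchies': 'Configuration',
--         'Sales Role': 'Configuration',
--         'Sales Plan': 'Configuration',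
--         'Territory': 'Configuration',
--         'Quota': 'Configuration',
--         'Data Classification': 'Configuration',
--
--         # Incentive Compensation mappings
--         'Incentive Compensation': 'Configuration',
--         'Sales Crediting': 'Configuration',
--         'Performance Measurements': 'Configuration',
--         'Measurement Attainments': 'Configuration',
--         'Incentives': 'Configuration',
--         'Compensation': 'Configuration',
--         'Earnings': 'Configuration',
--         'Payments': 'Configuration',
--
--         # Data Integration mappings
--         'Data Integration': 'Data Integration',
--         'Import': 'Data Integration',
--         'Export': 'Data Integration',
--         'ETL': 'Data Integration',
--         'API': 'Data Integration',
--         'File': 'Data Integration',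
--
--         # Reporting mappings
--         'Reports': 'Reporting',
--         'Reporting': 'Reporting',
--         'Analytics': 'Reporting',
--         'Dashboard': 'Reporting',
--         'Visualizations': 'Reporting',
--         'Sales Intelligence': 'Reporting',
--         'Sales Insights': 'Reporting',
--
--         # Workflow mappings
--         'Workflow': 'Workflow',
--         'Process': 'Workflow',
--         'Approval': 'Workflow',
--         'State Transition': 'Workflow',
--
--         # Change Management mappings
--         'Change Management': 'Change Management',
--         'Training': 'Change Management',
--         'Communication': 'Change Management',
--         'Adoption': 'Change Management',
--
--         # Release Management mappings
--         'Release': 'Release Management',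
--         'Deployment': 'Release Management',
--         'Migration': 'Release Management',
--
--         # Vendor Support mappings
--         'Vendor': 'Vendor Support',
--         'Support': 'Vendor Support',
--         'SSO': 'Vendor Support',
--         'Performance': 'Vendor Support',
--         'Testing': 'Vendor Support'
--     }
--
--     # Look for exact match first
--     for key, value in category_mapping.items():
--         if key.lower() == comm_plan_category.lower():
--             return value
--
--     # If no exact match, try partial match
--     for key, value in category_mapping.items():
--         if key.lower() in comm_plan_category.lower() or comm_plan_category.lower() in key.lower():
--             return value
--
--     # Default to Configuration if no match is found
--     return 'Configuration'
-- ===== SOURCE B (Python) =====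
-- from typing import Optional
--
-- # Keys pre-lowered and grouped by their estimator category, in the original
-- # dict's order (the dict lists each category's keys contiguously).
-- _GROUPS = [
--     ("Configuration",
--      ["sales planning", "sales hierarchies", "sales role", "sales plan",
--       "territory", "quota", "data classification", "incentive compensation",
--       "sales crediting", "performance measurements", "measurement attainments",
--       "incentives", "compensation", "earnings", "payments"]),
--     ("Data Integration",
--      ["data integration", "import", "export", "etl", "api", "file"]),
--     ("Reporting",
--      ["reports", "reporting", "analytics", "dashboard", "visualizations",
--       "sales intelligence", "sales insights"]),
--     ("Workflow",
--      ["workflow", "process", "approval", "state transition"]),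
--     ("Change Management",
--      ["change management", "training", "communication", "adoption"]),
--     ("Release Management",
--      ["release", "deployment", "migration"]),
--     ("Vendor Support",
--      ["vendor", "support", "sso", "performance", "testing"]),
-- ]
--
--
-- def _map_category_to_estimator(comm_plan_category: str) -> Optional[str]:
--     """Single pass over pre-lowered grouped keys: exact match returns at once,
--     the first partial match is remembered."""
--     needle = comm_plan_category.lower()
--     partial = None
--     for value, keys in _GROUPS:
--         for k in keys:
--             if k == needle:
--                 return value
--             if partial is None and (k in needle or needle in k):
--                 partial = value
--     return partial if partial is not None else 'Configuration'
-- ===== Notes on version B (the rewrite author's own statement) =====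
-- stated objective: faster
-- what changed: Restructures the flat dict into a pre-lowered list of (category, keys) groups and replaces A's two sequential full scans (exact pass, then partial pass, re-lowering every key and the input each comparison) by a single nested pass that lowers the input once and remembers only the first partial match.
import Mathlib
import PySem

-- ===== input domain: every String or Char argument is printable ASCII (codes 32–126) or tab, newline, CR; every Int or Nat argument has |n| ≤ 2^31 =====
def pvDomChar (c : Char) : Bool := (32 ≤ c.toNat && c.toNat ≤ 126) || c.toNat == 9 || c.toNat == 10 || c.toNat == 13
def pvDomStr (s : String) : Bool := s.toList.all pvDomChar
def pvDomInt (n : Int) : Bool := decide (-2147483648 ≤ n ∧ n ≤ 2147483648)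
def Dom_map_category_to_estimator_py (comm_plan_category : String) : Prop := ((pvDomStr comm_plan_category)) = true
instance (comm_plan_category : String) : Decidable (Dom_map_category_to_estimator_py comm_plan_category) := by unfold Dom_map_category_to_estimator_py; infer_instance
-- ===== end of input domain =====

-- B regroups the dict into a pre-lowered (category, keys) table and fuses A's two full
-- scans into one nested pass that remembers the first partial match; constant-factor faster.

-- ===== PORT A =====
def pvMapping : List (String × String) :=
  [("Sales Planning", "Configuration"),
  ("Sales Hierarchies", "Configuration"),
  ("Sales Role", "Configuration"),
  ("Sales Plan", "Configuration"),
  ("Territory", "Configuration"),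
  ("Quota", "Configuration"),
  ("Data Classification", "Configuration"),
  ("Incentive Compensation", "Configuration"),
  ("Sales Crediting", "Configuration"),
  ("Performance Measurements", "Configuration"),
  ("Measurement Attainments", "Configuration"),
  ("Incentives", "Configuration"),
  ("Compensation", "Configuration"),
  ("Earnings", "Configuration"),
  ("Payments", "Configuration"),
  ("Data Integration", "Data Integration"),
  ("Import", "Data Integration"),
  ("Export", "Data Integration"),
  ("ETL", "Data Integration"),
  ("API", "Data Integration"),
  ("File", "Data Integration"),
  ("Reports", "Reporting"),
  ("Reporting", "Reporting"),
  ("Analytics", "Reporting"),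
  ("Dashboard", "Reporting"),
  ("Visualizations", "Reporting"),
  ("Sales Intelligence", "Reporting"),
  ("Sales Insights", "Reporting"),
  ("Workflow", "Workflow"),
  ("Process", "Workflow"),
  ("Approval", "Workflow"),
  ("State Transition", "Workflow"),
  ("Change Management", "Change Management"),
  ("Training", "Change Management"),
  ("Communication", "Change Management"),
  ("Adoption", "Change Management"),
  ("Release", "Release Management"),
  ("Deployment", "Release Management"),
  ("Migration", "Release Management"),
  ("Vendor", "Vendor Support"),
  ("Support", "Vendor Support"),
  ("SSO", "Vendor Support"),
  ("Performance", "Vendor Support"),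
  ("Testing", "Vendor Support")]

-- first loop of A: exact match on lowered strings
def pvLoop1 (s : String) : List (String × String) → Option String
  | [] => none
  | (k, v) :: t =>
    if PySem.Str.lower k == PySem.Str.lower s then some v else pvLoop1 s t

-- second loop of A: partial (substring either way) match on lowered strings
def pvLoop2 (s : String) : List (String × String) → Option String
  | [] => none
  | (k, v) :: t =>
    if PySem.Str.isIn (PySem.Str.lower k) (PySem.Str.lower s)
       || PySem.Str.isIn (PySem.Str.lower s) (PySem.Str.lower k) then some v
    else pvLoop2 s t

def map_category_to_estimator_py (comm_plan_category : String) : Option String :=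
  match pvLoop1 comm_plan_category pvMapping with
  | some v => some v
  | none =>
    match pvLoop2 comm_plan_category pvMapping with
    | some v => some v
    | none => some "Configuration"

-- ===== PORT B =====
-- the table of Source B: keys pre-lowered, grouped contiguously by estimator category
def pvGroups : List (String × List String) :=
  [("Configuration",
    ["sales planning", "sales hierarchies", "sales role", "sales plan",
     "territory", "quota", "data classification", "incentive compensation",
     "sales crediting", "performance measurements", "measurement attainments",
     "incentives", "compensation", "earnings", "payments"]),
   ("Data Integration",
    ["data integration", "import", "export", "etl", "api", "file"]),
   ("Reporting",
    ["reports", "reporting", "analytics", "dashboard", "visualizations",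
     "sales intelligence", "sales insights"]),
   ("Workflow",
    ["workflow", "process", "approval", "state transition"]),
   ("Change Management",
    ["change management", "training", "communication", "adoption"]),
   ("Release Management",
    ["release", "deployment", "migration"]),
   ("Vendor Support",
    ["vendor", "support", "sso", "performance", "testing"])]

-- inner loop over one group's keys: Sum.inl = early return (exact match),
-- Sum.inr = continue with the (possibly updated) first-partial accumulator
def pvInnerB (needle v : String) (acc : Option String) : List String → Option String ⊕ Option String
  | [] => Sum.inr acc
  | k :: t =>
    if k == needle then Sum.inl (some v)
    else pvInnerB needle v
      (if acc.isNone && (PySem.Str.isIn k needle || PySem.Str.isIn needle k)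
       then some v else acc) t

-- outer loop over the groups
def pvOuterB (needle : String) (acc : Option String) : List (String × List String) → Option String
  | [] => some (acc.getD "Configuration")
  | (v, ks) :: t =>
    match pvInnerB needle v acc ks with
    | Sum.inl r => r
    | Sum.inr acc' => pvOuterB needle acc' t

def map_category_to_estimator_py_alt (comm_plan_category : String) : Option String :=
  pvOuterB (PySem.Str.lower comm_plan_category) none pvGroups

-- ===== PRECONDITION & SPEC =====
def Spec_map_category_to_estimator_py (comm_plan_category : String) (out : Option String) : Prop := out = map_category_to_estimator_py_alt comm_plan_category
instance (comm_plan_category : String) (out : Option String) : Decidable (Spec_map_category_to_estimator_py comm_plan_category out) := by unfold Spec_map_category_to_estimator_py; infer_instance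

-- ===== CLAIM (what is proved, stated in full; the proofs are below) =====
def Claim_equal_map_category_to_estimator_py : Prop := ∀ (comm_plan_category : String), Dom_map_category_to_estimator_py comm_plan_category → Spec_map_category_to_estimator_py comm_plan_category (map_category_to_estimator_py comm_plan_category)

-- ===== LEMMAS AND PROOFS =====

-- proof-only reference form: one fused pass over an already-lowered flat pair list
def pvFused (needle : String) (acc : Option String) : List (String × String) → Option String
  | [] => some (acc.getD "Configuration")
  | (k, v) :: t =>
    if k == needle then some v
    else pvFused needle
      (if acc.isNone && (PySem.Str.isIn k needle || PySem.Str.isIn needle k)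
       then some v else acc) t

-- flatten a group into lowered (key, value) pairs
def pvFlat (g : String × List String) : List (String × String) :=
  g.2.map (fun k => (k, g.1))

-- the nested B loop equals the fused pass over the flattened table
theorem pvOuterB_eq_fused (needle : String) (acc : Option String)
    (gs : List (String × List String)) :
    pvOuterB needle acc gs = pvFused needle acc (gs.flatMap pvFlat) := by
  induction gs generalizing acc with
  | nil => simp [pvOuterB, pvFused]
  | cons g t ih =>
    obtain ⟨v, ks⟩ := g
    induction ks generalizing acc with
    | nil => simpa [pvOuterB, pvInnerB, pvFlat] using ih acc
    | cons k kt ihk =>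
      by_cases h : (k == needle) = true
      · simp [pvOuterB, pvInnerB, pvFlat, pvFused, h]
      · have := ihk (if acc.isNone && (PySem.Str.isIn k needle || PySem.Str.isIn needle k)
            then some v else acc)
        simp only [pvOuterB, pvInnerB, h] at this ⊢
        simpa [pvFlat, pvFused, h] using this

-- the fused pass over lowered pairs computes A's "exact, else acc-or-first-partial, else default"
theorem pvFused_eq (s : String) (m : List (String × String)) (acc : Option String) :
    pvFused (PySem.Str.lower s) acc (m.map (fun p => (PySem.Str.lower p.1, p.2))) =
      (match pvLoop1 s m with
       | some v => some v
       | none => some ((acc.orElse (fun _ => pvLoop2 s m)).getD "Configuration")) := by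
  induction m generalizing acc with
  | nil => cases acc <;> simp [pvFused, pvLoop1, pvLoop2, Option.orElse]
  | cons p t ih =>
    obtain ⟨k, v⟩ := p
    by_cases hex : (PySem.Str.lower k == PySem.Str.lower s) = true
    · simp [pvFused, pvLoop1, hex]
    · rw [show pvFused (PySem.Str.lower s) acc
            (((k, v) :: t).map (fun p => (PySem.Str.lower p.1, p.2))) =
          pvFused (PySem.Str.lower s)
            (if acc.isNone && (PySem.Str.isIn (PySem.Str.lower k) (PySem.Str.lower s)
                || PySem.Str.isIn (PySem.Str.lower s) (PySem.Str.lower k))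
             then some v else acc) (t.map (fun p => (PySem.Str.lower p.1, p.2))) from by
        simp [pvFused, hex]]
      rw [ih]
      cases acc with
      | some a => simp [pvLoop1, hex, Option.orElse]
      | none =>
        cases hm : pvLoop1 s t with
        | some w => simp [pvLoop1, hex, hm]
        | none =>
          simp only [pvLoop1, pvLoop2, hex, hm, Option.orElse]
          split_ifs <;> simp_all

-- B's concrete table is exactly A's mapping with keys lowered
theorem pvGroups_flat :
    pvGroups.flatMap pvFlat = pvMapping.map (fun p => (PySem.Str.lower p.1, p.2)) := by
  decide

-- ===== VERDICT (by name: the statement is the Claim_ definition above) =====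
theorem map_category_to_estimator_py_spec : Claim_equal_map_category_to_estimator_py := by
  intro s _
  unfold Spec_map_category_to_estimator_py map_category_to_estimator_py map_category_to_estimator_py_alt
  rw [pvOuterB_eq_fused, pvGroups_flat, pvFused_eq]
  cases h1 : pvLoop1 s pvMapping with
  | some v => simp
  | none =>
    cases h2 : pvLoop2 s pvMapping with
    | some v => simp [Option.orElse]
    | none => simp [Option.orElse]
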